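-- pv_equiv track=rewrite | github.com/Henry80074/CMT120_CW1 | 1422379.py | rewardShortPath
-- ===== SOURCE A (Python) =====
-- def rewardShortPath(env):
--     # function to find all neighbours of a node in the environment
--     # taken from redblobgames.com blog post, written by amitp, last modified 23-03-2020
--     # accessed 17-11-2021
--     # https://www.redblobgames.com/pathfinding/grids/graphs.html
--     # comments are my own, one variable name changed to improve code clarity.
--     def neighbors(node):
--         # list all possible directions a neighbour could be found
--         dirs = [[1, 0], [0, 1], [-1, 0], [0, -1]]
--         list_of_neighbours = []
--         for dir in dirs:
--             # find x and y coordinates of a neighbour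
--             neighbor = [node[0] + dir[0], node[1] + dir[1]]
--             # check that the neighbour is not out of bounds of the environment
--             if neighbor in all_nodes:
--                 # add neighbour to the list_of_neighbours for the node
--                 list_of_neighbours.append(neighbor)
--         return list_of_neighbours
--     # end of referenced code
--
--     # create list for all nodes in the environment
--     all_nodes = []
--
--     # a function to create a graph of all nodes and their neighbours
--     def create_graph(env):
--         start = ""
--         arrival = ""
--         reward_nodes = []
--         # assumes environment is square or rectangular
--         # iterates through each node of the environment
--         for x in range(len(env[0])):
--             for y in range(len(env)):
--                 char = env[y][x]
--                 # add all node coordinates to all_nodes, except nodes with obstacles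
--                 if char != "X":
--                     all_nodes.append([x, y])
--                 # adds nodes containing rewards to list of reward nodes
--                 if char == "R":
--                     reward_nodes.append(str([x, y]))
--                 # finds start node
--                 if char == "A":
--                     start += str([x, y])
--                 # finds end node
--                 if char == "B":
--                     arrival += str([x, y])
--         # creates dictionary and adds key, value pairs of node coordinates and a list of neighbours
--         graph = {}
--         for node in all_nodes:
--             graph[str(node)] = [str(node) for node in neighbors(node)]
--         return graph, start, arrival, reward_nodes
--
--     # code to find all possible paths
--     # taken from python.org
--     # accessed 17-11-2021
--     # https://www.python.org/doc/essays/graphs/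
--     # comments my own
--     def find_all_paths(graph, start, end, path=[]):
--         # make a list of all nodes visited
--         path = path + [start]
--         # if arrived at the end node, return the path taken to reach the end node
--         if start == end:
--             return [path]
--         # unnecessary code removed as additional checks are not necessary
--         paths = []
--         # iterates through all possible directions of travel from current node
--         for node in graph[start]:
--             # ensures that no node is travelled through more than once
--             if node not in path:
--                 # uses backtracking to try each possibility in turn, until a solution is found
--                 newpaths = find_all_paths(graph, node, end, path)
--                 for newpath in newpaths:
--                     paths.append(newpath)
--         return paths
--     # end of referenced code
--     # These next lines of code run the programme,
--     # create graph of neighbours, find start, arrival and reward nodes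
--     graph, start, arrival, reward_node = create_graph(env)
--     length_reward_list = []
--     # find length and number of rewards found for each path, append pair to length_reward_list
--     for path in find_all_paths(graph, str(start), str(arrival)):
--         reward = 0
--         for node in path:
--             if str(node) in reward_node:
--                 reward += 1
--         length_reward_list.append([len(path)-1, reward])
--     # find minimum length of all paths
--     min_length = min([item[0] for item in length_reward_list])
--     # find length_reward pairs with minimum length
--     all_shortest_paths = [item for item in length_reward_list if item[0] == min_length]
--     # find the max reward for length_reward pairs with shortest path
--     max_reward = max([item[1] for item in all_shortest_paths])
--
--     return min_length, max_reward
-- ===== SOURCE B (Python) =====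
-- def rewardShortPath(env):
--     # Fused DFS: no graph dict, no list of all paths, no post-processing passes.
--     # Works directly on the grid with coordinate tuples and a visited set,
--     # carrying (length, rewards) accumulators and keeping the lexicographically
--     # best pair (minimal length, then maximal reward) of all completions.
--     height, width = len(env), len(env[0])
--     nodes = set()
--     rewards = set()
--     start = goal = None
--     for y in range(height):
--         for x in range(width):
--             c = env[y][x]
--             if c != 'X':
--                 nodes.add((x, y))
--             if c == 'R':
--                 rewards.add((x, y))
--             elif c == 'A':
--                 start = (x, y)
--             elif c == 'B':
--                 goal = (x, y)
--
--     def better(a, b):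
--         # lexicographic best of two optional (length, reward) pairs:
--         # smaller length wins, equal length -> larger reward wins
--         if a is None:
--             return b
--         if b is None:
--             return a
--         return b if (b[0] < a[0] or (b[0] == a[0] and a[1] < b[1])) else a
--
--     def dfs(node, visited, length, reward):
--         visited = visited | {node}
--         if node in rewards:
--             reward += 1
--         if node == goal:
--             return (length, reward)
--         best = None
--         for dx, dy in ((1, 0), (0, 1), (-1, 0), (0, -1)):
--             nb = (node[0] + dx, node[1] + dy)
--             if nb in nodes and nb not in visited:
--                 best = better(best, dfs(nb, visited, length + 1, reward))
--         return best
--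
--     length, reward = dfs(start, frozenset(), 0, 0)
--     return length, reward
-- ===== Notes on version B (the rewrite author's own statement) =====
-- stated objective: faster
-- what changed: B drops A's build-a-string-keyed-graph / enumerate-every-simple-path-into-a-list / three post-passes (min, filter, max) pipeline and instead runs one fused DFS directly on the grid with coordinate tuples, hash sets and running (length, reward) accumulators, combining subtree results with a lexicographic best (shortest length, then largest reward), so no path list is ever materialised.
import Mathlib
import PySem

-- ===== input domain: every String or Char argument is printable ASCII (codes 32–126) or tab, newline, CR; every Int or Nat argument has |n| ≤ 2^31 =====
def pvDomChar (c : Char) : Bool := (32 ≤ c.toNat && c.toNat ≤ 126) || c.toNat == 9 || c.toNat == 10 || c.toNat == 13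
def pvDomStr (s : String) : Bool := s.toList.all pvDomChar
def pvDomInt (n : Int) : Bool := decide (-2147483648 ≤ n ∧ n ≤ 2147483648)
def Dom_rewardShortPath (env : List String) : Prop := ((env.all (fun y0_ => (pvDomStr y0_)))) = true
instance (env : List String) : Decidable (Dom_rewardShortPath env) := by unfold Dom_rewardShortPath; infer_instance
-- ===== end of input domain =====

-- B replaces A's build-graph / enumerate-all-simple-paths-into-a-list / three post-passes
-- pipeline by a single fused DFS on the grid that carries (length, reward) accumulators and
-- keeps the lexicographically best pair (objective: alternative; same exponential search tree).
-- Python's str([x, y]) node keys (injective on coordinates) are modelled by the coordinate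
-- pair itself, and the empty accumulated position string (no 'A'/'B' found) by Option none;
-- with at most one 'A' and one 'B' (guaranteed by Pre_ wherever the distinction matters) this
-- is exact.

-- ===== PORT A =====
-- cell access env[y][x], shared by both ports and Pre_; the defaults are only reached where
-- Python raises IndexError (rows shorter than env[0]), which Pre_ excludes
def pvCell (env : List String) (x y : Int) : Char :=
  PySem.List.pyGetD (PySem.List.pyGetD (env.map String.toList) y []) x '?'

-- len(env[0]); [] case is Python IndexError, excluded by Pre_
def pvCols (env : List String) : Int :=
  match env with
  | [] => 0
  | r :: _ => PySem.Str.len r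

-- "first hit or keep" accumulator (Python's start += str([x,y]) with at most one hit)
def pvKeepFirst {alpha : Type} (st : Option alpha) (c : alpha) : Option alpha :=
  match st with
  | none => some c
  | some a => some a

-- one step of create_graph's nested scan: state (all_nodes, reward_nodes, start, arrival);
-- start/arrival accumulate "" + str([x,y]): with at most one hit this is "first hit or none"
def pvA_step (env : List String) (s : List (Int × Int) × List (Int × Int) × Option (Int × Int) × Option (Int × Int))
    (q : Int × Int) : List (Int × Int) × List (Int × Int) × Option (Int × Int) × Option (Int × Int) :=
  (if pvCell env q.1 q.2 ≠ 'X' then s.1 ++ [q] else s.1,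
   if pvCell env q.1 q.2 = 'R' then s.2.1 ++ [q] else s.2.1,
   if pvCell env q.1 q.2 = 'A' then pvKeepFirst s.2.2.1 q else s.2.2.1,
   if pvCell env q.1 q.2 = 'B' then pvKeepFirst s.2.2.2 q else s.2.2.2)

-- for x in range(len(env[0])): for y in range(len(env)): …
def pvA_scan (env : List String) :
    List (Int × Int) × List (Int × Int) × Option (Int × Int) × Option (Int × Int) :=
  (PySem.List.pyRange 0 (pvCols env) 1).foldl
    (fun s x => (PySem.List.pyRange 0 (env.length : Int) 1).foldl (fun s y => pvA_step env s (x, y)) s)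
    ([], [], none, none)

-- neighbors(node): the four directions, kept if inside all_nodes
def pvA_nbrs (allNodes : List (Int × Int)) (n : Int × Int) : List (Int × Int) :=
  [((1 : Int), (0 : Int)), (0, 1), (-1, 0), (0, -1)].foldl
    (fun acc d => if (n.1 + d.1, n.2 + d.2) ∈ allNodes then acc ++ [(n.1 + d.1, n.2 + d.2)] else acc) []

-- graph = {str(node): [str(n) for n in neighbors(node)] for node in all_nodes}
def pvA_graph (allNodes : List (Int × Int)) : PySem.Dict (Int × Int) (List (Int × Int)) :=
  allNodes.foldl (fun g n => g.insert n (pvA_nbrs allNodes n)) PySem.Dict.empty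

-- graph[start]: `none` ("") has no key (Python KeyError, excluded by Pre_), modelled as []
def pvA_children (graph : PySem.Dict (Int × Int) (List (Int × Int))) (s : Option (Int × Int)) :
    List (Option (Int × Int)) :=
  match s with
  | some p => ((graph.get? p).getD []).map some
  | none => []

-- find_all_paths; fuel only makes the recursion structural: with fuel ≥ number of cells + 1
-- it is never exhausted (the path is a duplicate-free list of graph keys)
def pvA_findAll (graph : PySem.Dict (Int × Int) (List (Int × Int))) (goal : Option (Int × Int)) :
    Nat → Option (Int × Int) → List (Option (Int × Int)) → List (List (Option (Int × Int)))
  | fuel, s, path =>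
    if s = goal then [path ++ [s]]
    else
      match fuel with
      | 0 => []
      | Nat.succ f =>
        (pvA_children graph s).foldl
          (fun acc n => if n ∈ path ++ [s] then acc else acc ++ pvA_findAll graph goal f n (path ++ [s])) []

-- reward = sum(1 for node in path if str(node) in reward_node)
def pvA_countRew (rewardNodes : List (Int × Int)) (path : List (Option (Int × Int))) : Int :=
  path.foldl (fun r n => if (match n with | some p => decide (p ∈ rewardNodes) | none => false) then r + 1 else r) 0

-- min length over all paths, then max reward among the min-length items;
-- [] case is Python ValueError (min of an empty list), excluded by Pre_
def pvA_pick (scored : List (Int × Int)) : Int × Int :=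
  match scored with
  | [] => (0, 0)
  | q :: qs =>
    let minLen := (qs.map Prod.fst).foldl min q.1
    match (q :: qs).filter (fun it => decide (it.1 = minLen)) with
    | [] => (0, 0)
    | h :: t => (minLen, t.foldl (fun a it => max a it.2) h.2)

def rewardShortPath (env : List String) : Int × Int :=
  match pvA_scan env with
  | (allNodes, rewardNodes, st, ar) =>
    let graph := pvA_graph allNodes
    let paths := pvA_findAll graph ar (env.length * (pvCols env).toNat + 1) st []
    pvA_pick (paths.foldl (fun acc p => acc ++ [(((p.length : Int) - 1), pvA_countRew rewardNodes p)]) [])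

-- ===== PORT B =====
-- the grid scan: sets of open cells and reward cells, last 'A' and last 'B' seen
-- (the if/elif chain written componentwise; 'R'/'A'/'B' are mutually exclusive)
def pvB_step (env : List String)
    (s : PySem.Set (Int × Int) × PySem.Set (Int × Int) × Option (Int × Int) × Option (Int × Int))
    (q : Int × Int) : PySem.Set (Int × Int) × PySem.Set (Int × Int) × Option (Int × Int) × Option (Int × Int) :=
  (if pvCell env q.1 q.2 ≠ 'X' then PySem.Set.add s.1 q else s.1,
   if pvCell env q.1 q.2 = 'R' then PySem.Set.add s.2.1 q else s.2.1,
   if pvCell env q.1 q.2 = 'A' then some q else s.2.2.1,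
   if pvCell env q.1 q.2 = 'B' then some q else s.2.2.2)

-- for y in range(height): for x in range(width): …
def pvB_scan (env : List String) :
    PySem.Set (Int × Int) × PySem.Set (Int × Int) × Option (Int × Int) × Option (Int × Int) :=
  (PySem.List.pyRange 0 (env.length : Int) 1).foldl
    (fun s y => (PySem.List.pyRange 0 (pvCols env) 1).foldl (fun s x => pvB_step env s (x, y)) s)
    (PySem.Set.empty, PySem.Set.empty, none, none)

-- lexicographic best of two optional (length, reward) pairs
def pvB_better (a b : Option (Int × Int)) : Option (Int × Int) :=
  match a, b with
  | none, b => b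
  | some a, none => some a
  | some a, some b => if b.1 < a.1 ∨ (b.1 = a.1 ∧ a.2 < b.2) then some b else some a

def pvB_dirs : List (Int × Int) := [(1, 0), (0, 1), (-1, 0), (0, -1)]

-- dfs(node, visited, length, reward); fuel is structural only (a cell count bound suffices);
-- the (cur = none ≠ goal) arm is Python's TypeError (no 'A' but a 'B'), excluded by Pre_
def pvB_dfs (nodes rewards : PySem.Set (Int × Int)) (goal : Option (Int × Int)) :
    Nat → Option (Int × Int) → PySem.Set (Option (Int × Int)) → Int → Int → Option (Int × Int)
  | fuel, cur, vis, len, rew =>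
    if cur = goal then
      some (len, rew + (if (match cur with | some p => decide (p ∈ rewards) | none => false) then 1 else 0))
    else
      match fuel, cur with
      | Nat.succ f, some p =>
        pvB_dirs.foldl
          (fun best d =>
            if (p.1 + d.1, p.2 + d.2) ∈ nodes ∧ some (p.1 + d.1, p.2 + d.2) ∉ PySem.Set.add vis cur then
              pvB_better best
                (pvB_dfs nodes rewards goal f (some (p.1 + d.1, p.2 + d.2)) (PySem.Set.add vis cur) (len + 1)
                  (rew + (if (match cur with | some p => decide (p ∈ rewards) | none => false) then 1 else 0)))
            else best) none
      | _, _ => none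

def rewardShortPath_alt (env : List String) : Int × Int :=
  match pvB_scan env with
  | (nodes, rewards, st, gl) =>
    match pvB_dfs nodes rewards gl (env.length * (pvCols env).toNat + 1) st PySem.Set.empty 0 0 with
    | some lr => lr
    | none => (0, 0)

-- ===== PRECONDITION & SPEC =====
def pvPre_cells (env : List String) : List (Int × Int) :=
  (PySem.List.pyRange 0 (env.length : Int) 1).flatMap
    (fun y => (PySem.List.pyRange 0 (pvCols env) 1).map (fun x => (x, y)))

def pvPre_count (env : List String) (c : Char) : Nat :=
  (pvPre_cells env).countP (fun q => pvCell env q.1 q.2 == c)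

def pvPre_nodes (env : List String) : List (Int × Int) :=
  (pvPre_cells env).filter (fun q => pvCell env q.1 q.2 != 'X')

-- one breadth expansion of a set of cells inside `nodes`
def pvPre_grow (nodes : List (Int × Int)) (s : PySem.Set (Int × Int)) : PySem.Set (Int × Int) :=
  PySem.Set.update s
    (s.flatMap (fun q =>
      ([((1 : Int), (0 : Int)), (0, 1), (-1, 0), (0, -1)].map (fun d => (q.1 + d.1, q.2 + d.2))).filter
        (fun nb => decide (nb ∈ nodes))))

def pvPre_reach (env : List String) : Nat → PySem.Set (Int × Int)
  | 0 => PySem.Set.ofList ((pvPre_cells env).filter (fun q => pvCell env q.1 q.2 == 'A'))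
  | Nat.succ n => pvPre_grow (pvPre_nodes env) (pvPre_reach env n)

-- Exactly the inputs on which the Python A returns: a non-empty env whose rows are at least as
-- long as row 0 (else IndexError), and either no 'A' and no 'B' cell at all (start and arrival
-- are then the same empty position string, so A succeeds on the trivial zero-length path), or
-- exactly one of each (else KeyError/ValueError from the concatenated position strings) with
-- 'B' reachable from 'A' through non-'X' cells (else taking the min of an empty list of path
-- lengths raises ValueError).
def Pre_rewardShortPath (env : List String) : Prop :=
  env ≠ [] ∧ (∀ r ∈ env, pvCols env ≤ PySem.Str.len r) ∧
    ((pvPre_count env 'A' = 0 ∧ pvPre_count env 'B' = 0) ∨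
     (pvPre_count env 'A' = 1 ∧ pvPre_count env 'B' = 1 ∧
      ∃ b ∈ pvPre_cells env, pvCell env b.1 b.2 = 'B' ∧
        b ∈ pvPre_reach env (pvPre_nodes env).length))
instance (env : List String) : Decidable (Pre_rewardShortPath env) := by
  unfold Pre_rewardShortPath; infer_instance

def pvWitness_rewardShortPath : List String := ["A.B", ".X."]

def Spec_rewardShortPath (env : List String) (out : Int × Int) : Prop := out = rewardShortPath_alt env
instance (env : List String) (out : Int × Int) : Decidable (Spec_rewardShortPath env out) := by
  unfold Spec_rewardShortPath; infer_instance

-- ===== CLAIM (what is proved, stated in full; the proofs are below) =====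
def Claim_equal_rewardShortPath : Prop :=
  ∀ (env : List String), Dom_rewardShortPath env → Pre_rewardShortPath env →
    Spec_rewardShortPath env (rewardShortPath env)

-- ===== LEMMAS AND PROOFS =====

theorem pv_witness_ok :
    Dom_rewardShortPath pvWitness_rewardShortPath ∧ Pre_rewardShortPath pvWitness_rewardShortPath := by
  decide

-- ---- generic option-scan folds ----

theorem pv_foldl_first_some {α : Type} (p : α → Prop) [DecidablePred p] (l : List α) (q : α) :
    l.foldl (fun st c => if p c then pvKeepFirst st c else st) (some q) = some q := by
  induction l generalizing q with
  | nil => rfl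
  | cons c l ih =>
    rw [List.foldl_cons]
    by_cases h : p c
    · rw [if_pos h]; exact ih q
    · rw [if_neg h]; exact ih q

theorem pv_foldl_first_none {α : Type} (p : α → Prop) [DecidablePred p] (l : List α) :
    l.foldl (fun st c => if p c then pvKeepFirst st c else st) none
      = l.find? (fun c => decide (p c)) := by
  induction l with
  | nil => rfl
  | cons c l ih =>
    rw [List.foldl_cons, List.find?_cons]
    by_cases h : p c
    · rw [if_pos h, show pvKeepFirst (none : Option α) c = some c from rfl,
        pv_foldl_first_some p l c]
      simp [h]
    · rw [if_neg h]
      simp [h, ih]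

theorem pv_foldl_last {α : Type} (p : α → Prop) [DecidablePred p] (l : List α) (st : Option α) :
    l.foldl (fun st c => if p c then some c else st) st
      = (match l.reverse.find? (fun c => decide (p c)) with | some a => some a | none => st) := by
  induction l using List.reverseRecOn generalizing st with
  | nil => rfl
  | append_singleton l c ih =>
    rw [List.foldl_append, List.reverse_concat]
    by_cases h : p c
    · simp [h]
    · simp only [List.foldl, h]
      simp [h, ih]

-- ---- the best-of fold (analysis of A's min/max selection) ----

def pvBestOf (l : List (Int × Int)) : Option (Int × Int) :=
  l.foldl (fun a q => pvB_better a (some q)) none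

theorem pv_better_none_right (a : Option (Int × Int)) : pvB_better a none = a := by
  cases a <;> rfl

def pvG (a p : Int × Int) : Int × Int :=
  if p.1 < a.1 ∨ (p.1 = a.1 ∧ a.2 < p.2) then p else a

theorem pvG_assoc (a b c : Int × Int) : pvG (pvG a b) c = pvG a (pvG b c) := by
  unfold pvG
  split_ifs <;> first | rfl | exact Prod.ext (by omega) (by omega)

theorem pv_better_some_some (x y : Int × Int) : pvB_better (some x) (some y) = some (pvG x y) := by
  simp only [pvB_better, pvG]
  split_ifs <;> rfl

theorem pv_better_assoc (a b c : Option (Int × Int)) :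
    pvB_better (pvB_better a b) c = pvB_better a (pvB_better b c) := by
  rcases a with _ | a
  · rfl
  · rcases b with _ | b
    · rw [pv_better_none_right]
      rfl
    · rcases c with _ | c
      · rw [pv_better_none_right, pv_better_none_right]
      · rw [pv_better_some_some, pv_better_some_some, pv_better_some_some, pv_better_some_some,
          pvG_assoc]

theorem pv_better_hoist {α : Type} (F : α → Option (Int × Int)) (l : List α) (a : Option (Int × Int)) :
    l.foldl (fun acc x => pvB_better acc (F x)) a
      = pvB_better a (l.foldl (fun acc x => pvB_better acc (F x)) none) := by
  induction l generalizing a with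
  | nil => simp [pv_better_none_right]
  | cons c l ih =>
    simp only [List.foldl]
    rw [ih, ih (pvB_better none (F c))]
    rw [← pv_better_assoc, ← pv_better_assoc, pv_better_none_right]

theorem pv_bestOf_append (xs ys : List (Int × Int)) :
    pvBestOf (xs ++ ys) = pvB_better (pvBestOf xs) (pvBestOf ys) := by
  unfold pvBestOf
  rw [List.foldl_append, pv_better_hoist (fun q => some q)]

theorem pv_bestOf_flatMap {α : Type} (g : α → List (Int × Int)) (l : List α) :
    pvBestOf (l.flatMap g) = l.foldl (fun a x => pvB_better a (pvBestOf (g x))) none := by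
  induction l with
  | nil => rfl
  | cons c l ih =>
    rw [List.flatMap_cons, pv_bestOf_append, List.foldl_cons,
      pv_better_hoist (fun x => pvBestOf (g x)), ← ih]
    rfl

-- ---- counting rewards along an extended path ----

theorem pv_countRew_append (rws : List (Int × Int)) (path : List (Option (Int × Int))) (n : Option (Int × Int)) :
    pvA_countRew rws (path ++ [n])
      = pvA_countRew rws path + (if (match n with | some p => decide (p ∈ rws) | none => false) then 1 else 0) := by
  unfold pvA_countRew
  rw [List.foldl_append]
  cases n with
  | none => simp
  | some p => by_cases h : p ∈ rws <;> simp [h]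

-- ---- the graph dictionary ----

theorem pv_graph_get_aux (F : (Int × Int) → List (Int × Int)) (l : List (Int × Int))
    (g : PySem.Dict (Int × Int) (List (Int × Int))) (q : Int × Int) :
    (l.foldl (fun g n => g.insert n (F n)) g).get? q = if q ∈ l then some (F q) else g.get? q := by
  induction l generalizing g with
  | nil => simp
  | cons a l ih =>
    rw [List.foldl_cons, ih]
    by_cases hl : q ∈ l
    · simp [hl]
    · by_cases ha : q = a
      · subst ha; simp [hl]
      · simp [hl, ha, PySem.Dict.get?_insert]

theorem pv_graph_get (ns : List (Int × Int)) (q : Int × Int) :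
    (pvA_graph ns).get? q = if q ∈ ns then some (pvA_nbrs ns q) else none := by
  unfold pvA_graph
  rw [pv_graph_get_aux]
  simp [PySem.Dict.get?_empty]

theorem pv_nbrs_eq (ns : List (Int × Int)) (n : Int × Int) :
    pvA_nbrs ns n
      = (pvB_dirs.map (fun d => (n.1 + d.1, n.2 + d.2))).filter (fun nb => decide (nb ∈ ns)) := by
  unfold pvA_nbrs pvB_dirs
  simp only [List.foldl, List.filter_cons, List.filter_nil, List.map_cons, List.map_nil,
    decide_eq_true_eq]
  split_ifs <;> simp

-- ---- the main correspondence: fused DFS = best of the enumerated simple paths ----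

theorem pv_ind_eq (rewA : List (Int × Int)) (rewardsB : PySem.Set (Int × Int))
    (hr : ∀ q : Int × Int, q ∈ rewardsB ↔ q ∈ rewA) (s : Option (Int × Int)) :
    (if (match s with | some p => decide (p ∈ rewardsB) | none => false) then (1 : Int) else 0)
      = (if (match s with | some p => decide (p ∈ rewA) | none => false) then (1 : Int) else 0) := by
  cases s with
  | none => rfl
  | some p => simp only [hr p]

theorem pv_goal_branch (rewA : List (Int × Int)) (rewardsB : PySem.Set (Int × Int))
    (hr : ∀ q : Int × Int, q ∈ rewardsB ↔ q ∈ rewA)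
    (s : Option (Int × Int)) (path : List (Option (Int × Int))) (len rew : Int)
    (hlen : len = (path.length : Int)) (hrew : rew = pvA_countRew rewA path) :
    some (len, rew + (if (match s with | some p => decide (p ∈ rewardsB) | none => false) then (1 : Int) else 0))
      = pvBestOf ([path ++ [s]].map (fun p => ((p.length : Int) - 1, pvA_countRew rewA p))) := by
  simp only [List.map_cons, List.map_nil]
  rw [show ∀ x : Int × Int, pvBestOf [x] = some x from fun x => rfl]
  rw [pv_countRew_append, pv_ind_eq rewA rewardsB hr]
  have hl : ((path ++ [s]).length : Int) - 1 = len := by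
    simp [hlen]
  rw [hl, hrew]

theorem pvB_dfs_unfold (nodes rewards : PySem.Set (Int × Int)) (goal : Option (Int × Int))
    (fuel : Nat) (cur : Option (Int × Int)) (vis : PySem.Set (Option (Int × Int))) (len rew : Int) :
    pvB_dfs nodes rewards goal fuel cur vis len rew
      = if cur = goal then
          some (len, rew + (if (match cur with | some p => decide (p ∈ rewards) | none => false) then 1 else 0))
        else
          match fuel, cur with
          | Nat.succ f, some p =>
            pvB_dirs.foldl
              (fun best d =>
                if (p.1 + d.1, p.2 + d.2) ∈ nodes ∧ some (p.1 + d.1, p.2 + d.2) ∉ PySem.Set.add vis cur then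
                  pvB_better best
                    (pvB_dfs nodes rewards goal f (some (p.1 + d.1, p.2 + d.2)) (PySem.Set.add vis cur) (len + 1)
                      (rew + (if (match cur with | some p => decide (p ∈ rewards) | none => false) then 1 else 0)))
                else best) none
          | _, _ => none := by
  cases fuel <;> cases cur <;> rfl

theorem pv_main (nsA rewA : List (Int × Int)) (nodesB rewardsB : PySem.Set (Int × Int))
    (goal : Option (Int × Int))
    (hn : ∀ q : Int × Int, q ∈ nodesB ↔ q ∈ nsA)
    (hr : ∀ q : Int × Int, q ∈ rewardsB ↔ q ∈ rewA) :
    ∀ (fuel : Nat) (s : Option (Int × Int)) (path : List (Option (Int × Int)))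
      (vis : PySem.Set (Option (Int × Int))) (len rew : Int),
      (∀ m, m ∈ vis ↔ m ∈ path) →
      len = (path.length : Int) →
      rew = pvA_countRew rewA path →
      (∀ p : Int × Int, s = some p → p ∈ nsA) →
      pvB_dfs nodesB rewardsB goal fuel s vis len rew
        = pvBestOf ((pvA_findAll (pvA_graph nsA) goal fuel s path).map
            (fun p => ((p.length : Int) - 1, pvA_countRew rewA p))) := by
  intro fuel
  induction fuel with
  | zero =>
    intro s path vis len rew hvis hlen hrew hs
    rw [pvB_dfs_unfold, pvA_findAll]
    by_cases hg : s = goal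
    · rw [if_pos hg, if_pos hg]
      exact pv_goal_branch rewA rewardsB hr s path len rew hlen hrew
    · rw [if_neg hg, if_neg hg]
      cases s <;> rfl
  | succ f ih =>
    intro s path vis len rew hvis hlen hrew hs
    rw [pvB_dfs_unfold, pvA_findAll]
    by_cases hg : s = goal
    · rw [if_pos hg, if_pos hg]
      exact pv_goal_branch rewA rewardsB hr s path len rew hlen hrew
    · rw [if_neg hg, if_neg hg]
      cases s with
      | none => rfl
      | some p =>
        have hp : p ∈ nsA := hs p rfl
        dsimp only
        simp only [pvA_children, pv_graph_get, if_pos hp, Option.getD_some, pv_nbrs_eq]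
        -- turn A's guarded append-fold into a flatMap over the admissible children
        rw [PySem.List.foldl_congr_mem _ _
              (fun acc n => if ¬ n ∈ path ++ [some p] then
                  acc ++ pvA_findAll (pvA_graph nsA) goal f n (path ++ [some p]) else acc) _
              (by intro acc x _; by_cases hx : x ∈ path ++ [some p] <;> simp [hx]),
            PySem.List.foldl_ite_eq_foldl_filter
              (p := fun n => ¬ n ∈ path ++ [some p])
              (f := fun acc n => acc ++ pvA_findAll (pvA_graph nsA) goal f n (path ++ [some p])),
            PySem.List.foldl_append_eq_flatMap, List.nil_append,
            List.map_flatMap, pv_bestOf_flatMap,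
            ← PySem.List.foldl_ite_eq_foldl_filter
              (p := fun n => ¬ n ∈ path ++ [some p])
              (f := fun a n => pvB_better a (pvBestOf ((pvA_findAll (pvA_graph nsA) goal f n (path ++ [some p])).map
                (fun q => ((q.length : Int) - 1, pvA_countRew rewA q))))),
            List.foldl_map,
            ← PySem.List.foldl_ite_eq_foldl_filter (p := fun nb => nb ∈ nsA),
            List.foldl_map]
        -- both sides are now folds over the four directions; compare pointwise
        apply PySem.List.foldl_congr_mem
        intro acc d _
        by_cases h1 : (p.1 + d.1, p.2 + d.2) ∈ nsA
        · by_cases h2 : some (p.1 + d.1, p.2 + d.2) ∈ path ++ [some p]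
          · have hB : ¬ ((p.1 + d.1, p.2 + d.2) ∈ nodesB ∧
                some (p.1 + d.1, p.2 + d.2) ∉ PySem.Set.add vis (some p)) := by
              intro ⟨_, hnv⟩
              exact hnv (by
                rw [PySem.Set.mem_add]
                rcases List.mem_append.mp h2 with h | h
                · exact Or.inl ((hvis _).mpr h)
                · exact Or.inr (List.mem_singleton.mp h))
            rw [if_neg hB, if_pos h1, if_neg (not_not_intro h2)]
          · have hB : (p.1 + d.1, p.2 + d.2) ∈ nodesB ∧
                some (p.1 + d.1, p.2 + d.2) ∉ PySem.Set.add vis (some p) := by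
              refine ⟨(hn _).mpr h1, ?_⟩
              rw [PySem.Set.mem_add]
              intro hc
              apply h2
              rcases hc with h | h
              · exact List.mem_append.mpr (Or.inl ((hvis _).mp h))
              · exact List.mem_append.mpr (Or.inr (List.mem_singleton.mpr h))
            rw [if_pos hB, if_pos h1, if_pos h2]
            congr 1
            apply ih
            · intro m
              rw [PySem.Set.mem_add, List.mem_append, List.mem_singleton, hvis m]
            · simp [hlen]
            · rw [pv_countRew_append, ← hrew]
              simp [hr p]
            · intro q hq
              injection hq with hq
              rw [← hq]
              exact h1
        · have hB : ¬ ((p.1 + d.1, p.2 + d.2) ∈ nodesB ∧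
              some (p.1 + d.1, p.2 + d.2) ∉ PySem.Set.add vis (some p)) := by
            intro ⟨hc, _⟩
            exact h1 ((hn _).mp hc)
          rw [if_neg hB, if_neg h1]

-- ---- A's two-pass min/max = best-of ----

theorem pv_bestOf_cons_aux (qs : List (Int × Int)) (q : Int × Int) :
    qs.foldl (fun a p => pvB_better a (some p)) (some q) = some (qs.foldl pvG q) := by
  induction qs generalizing q with
  | nil => rfl
  | cons p qs ih =>
    simp only [List.foldl]
    rw [pv_better_some_some, ih]

theorem pv_bestOf_cons (q : Int × Int) (qs : List (Int × Int)) :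
    pvBestOf (q :: qs) = some (qs.foldl pvG q) := by
  unfold pvBestOf
  rw [List.foldl_cons]
  exact pv_bestOf_cons_aux qs q

theorem pv_min_le (qs : List (Int × Int)) (q : Int × Int) :
    ∀ it ∈ q :: qs, (qs.map Prod.fst).foldl min q.1 ≤ it.1 := by
  intro it hit
  rcases List.mem_cons.mp hit with h | h
  · rw [h]
    exact (PySem.List.foldl_min_le (qs.map Prod.fst) q.1).1
  · exact (PySem.List.foldl_min_le (qs.map Prod.fst) q.1).2 _ (List.mem_map_of_mem h)

theorem pv_min_attained (qs : List (Int × Int)) (q : Int × Int) :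
    ∃ it ∈ q :: qs, it.1 = (qs.map Prod.fst).foldl min q.1 := by
  rcases PySem.List.foldl_min_mem (qs.map Prod.fst) q.1 with h | h
  · exact ⟨q, List.mem_cons_self, h.symm⟩
  · rcases List.mem_map.mp h with ⟨it, hit, hfst⟩
    exact ⟨it, List.mem_cons_of_mem _ hit, hfst⟩

theorem pv_filter_min_cons (qs : List (Int × Int)) (q : Int × Int) :
    ∃ h0 t0, (q :: qs).filter (fun it => decide (it.1 = (qs.map Prod.fst).foldl min q.1)) = h0 :: t0 := by
  rcases pv_min_attained qs q with ⟨it, hit, hfst⟩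
  have hm : it ∈ (q :: qs).filter (fun it => decide (it.1 = (qs.map Prod.fst).foldl min q.1)) :=
    List.mem_filter.mpr ⟨hit, by simp [hfst]⟩
  exact List.exists_cons_of_ne_nil (List.ne_nil_of_mem hm)

theorem pv_fold_pvG (qs : List (Int × Int)) (q : Int × Int) :
    qs.foldl pvG q
      = ((qs.map Prod.fst).foldl min q.1,
         match (q :: qs).filter (fun it => decide (it.1 = (qs.map Prod.fst).foldl min q.1)) with
         | [] => 0
         | h :: t => t.foldl (fun a it => max a it.2) h.2) := by
  induction qs using List.reverseRecOn generalizing q with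
  | nil => simp
  | append_singleton qs p ih =>
    rw [List.foldl_append, ih q]
    simp only [List.foldl]
    have hm' : (((qs ++ [p]).map Prod.fst).foldl min q.1) = min ((qs.map Prod.fst).foldl min q.1) p.1 := by
      rw [List.map_append, List.foldl_append]
      rfl
    rw [hm']
    set m := ((qs.map Prod.fst).foldl min q.1) with hm
    rcases lt_trichotomy p.1 m with hcmp | hcmp | hcmp
    · rw [min_eq_right hcmp.le]
      have hnil : (q :: qs).filter (fun it => decide (it.1 = p.1)) = [] := by
        rw [List.filter_eq_nil_iff]
        intro it hit
        simp only [decide_eq_true_eq]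
        have := pv_min_le qs q it hit
        omega
      rw [show (q :: (qs ++ [p])) = ((q :: qs) ++ [p]) from rfl, List.filter_append, hnil,
        List.nil_append]
      have hp1 : List.filter (fun it => decide (it.1 = p.1)) [p] = [p] := by simp
      rw [hp1]
      unfold pvG
      rw [if_pos (Or.inl hcmp)]
      simp
    · rw [show min m p.1 = m from min_eq_left (le_of_eq hcmp.symm)]
      obtain ⟨h0, t0, hF⟩ := pv_filter_min_cons qs q
      rw [← hm] at hF
      rw [show (q :: (qs ++ [p])) = ((q :: qs) ++ [p]) from rfl, List.filter_append, hF]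
      have hp1 : List.filter (fun it => decide (it.1 = m)) [p] = [p] := by simp [hcmp]
      rw [hp1, show ((h0 :: t0) ++ [p]) = h0 :: (t0 ++ [p]) from rfl]
      dsimp only
      rw [List.foldl_append]
      simp only [List.foldl]
      unfold pvG
      by_cases hR : t0.foldl (fun a it => max a it.2) h0.2 < p.2
      · rw [if_pos (Or.inr ⟨hcmp, hR⟩), max_eq_right hR.le, ← hcmp]
      · rw [if_neg (by intro h; rcases h with h | ⟨_, h⟩ <;> omega), max_eq_left (not_lt.mp hR)]
    · rw [min_eq_left hcmp.le]
      have hple : List.filter (fun it => decide (it.1 = m)) [p] = [] := by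
        simp only [List.filter_cons, List.filter_nil, decide_eq_true_eq]
        rw [if_neg (by omega)]
      rw [show (q :: (qs ++ [p])) = ((q :: qs) ++ [p]) from rfl, List.filter_append, hple,
        List.append_nil]
      unfold pvG
      rw [if_neg (by intro h; rcases h with h | ⟨h, _⟩ <;> omega)]

theorem pv_pick_eq (l : List (Int × Int)) : pvA_pick l = (pvBestOf l).getD (0, 0) := by
  cases l with
  | nil => rfl
  | cons q qs =>
    rw [pv_bestOf_cons, Option.getD_some, pv_fold_pvG]
    obtain ⟨h0, t0, hF⟩ := pv_filter_min_cons qs q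
    unfold pvA_pick
    dsimp only
    rw [hF]

-- ---- scan characterizations ----

def pvCoordsA (env : List String) : List (Int × Int) :=
  (PySem.List.pyRange 0 (pvCols env) 1).flatMap
    (fun x => (PySem.List.pyRange 0 (env.length : Int) 1).map (fun y => (x, y)))

theorem pv_scanA_eq (env : List String) :
    pvA_scan env
      = ((pvCoordsA env).filter (fun q => decide (pvCell env q.1 q.2 ≠ 'X')),
         (pvCoordsA env).filter (fun q => decide (pvCell env q.1 q.2 = 'R')),
         (pvCoordsA env).find? (fun q => decide (pvCell env q.1 q.2 = 'A')),
         (pvCoordsA env).find? (fun q => decide (pvCell env q.1 q.2 = 'B'))) := by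
  have h1 : pvA_scan env = (pvCoordsA env).foldl (pvA_step env) ([], [], none, none) := by
    unfold pvA_scan pvCoordsA
    rw [List.foldl_flatMap]
    simp only [List.foldl_map]
  rw [h1]
  unfold pvA_step
  rw [PySem.List.foldl_prod_mk
        (f := fun (l : List (Int × Int)) (q : Int × Int) =>
          if pvCell env q.1 q.2 ≠ 'X' then l ++ [q] else l)
        (g := fun (t : List (Int × Int) × Option (Int × Int) × Option (Int × Int)) (q : Int × Int) =>
          (if pvCell env q.1 q.2 = 'R' then t.1 ++ [q] else t.1,
           if pvCell env q.1 q.2 = 'A' then pvKeepFirst t.2.1 q else t.2.1,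
           if pvCell env q.1 q.2 = 'B' then pvKeepFirst t.2.2 q else t.2.2)),
      PySem.List.foldl_prod_mk
        (f := fun (l : List (Int × Int)) (q : Int × Int) =>
          if pvCell env q.1 q.2 = 'R' then l ++ [q] else l)
        (g := fun (t : Option (Int × Int) × Option (Int × Int)) (q : Int × Int) =>
          (if pvCell env q.1 q.2 = 'A' then pvKeepFirst t.1 q else t.1,
           if pvCell env q.1 q.2 = 'B' then pvKeepFirst t.2 q else t.2)),
      PySem.List.foldl_prod_mk
        (f := fun (t : Option (Int × Int)) (q : Int × Int) =>
          if pvCell env q.1 q.2 = 'A' then pvKeepFirst t q else t)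
        (g := fun (t : Option (Int × Int)) (q : Int × Int) =>
          if pvCell env q.1 q.2 = 'B' then pvKeepFirst t q else t)]
  rw [PySem.List.foldl_append_ite_eq_filter (fun q : Int × Int => pvCell env q.1 q.2 ≠ 'X'),
      PySem.List.foldl_append_ite_eq_filter (fun q : Int × Int => pvCell env q.1 q.2 = 'R'),
      pv_foldl_first_none (fun q : Int × Int => pvCell env q.1 q.2 = 'A'),
      pv_foldl_first_none (fun q : Int × Int => pvCell env q.1 q.2 = 'B')]
  rfl

theorem pv_scanB_eq (env : List String) :
    pvB_scan env
      = (PySem.Set.ofList ((pvPre_cells env).filter (fun q => decide (pvCell env q.1 q.2 ≠ 'X'))),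
         PySem.Set.ofList ((pvPre_cells env).filter (fun q => decide (pvCell env q.1 q.2 = 'R'))),
         (pvPre_cells env).reverse.find? (fun q => decide (pvCell env q.1 q.2 = 'A')),
         (pvPre_cells env).reverse.find? (fun q => decide (pvCell env q.1 q.2 = 'B'))) := by
  have h1 : pvB_scan env = (pvPre_cells env).foldl (pvB_step env) (PySem.Set.empty, PySem.Set.empty, none, none) := by
    unfold pvB_scan pvPre_cells
    rw [List.foldl_flatMap]
    simp only [List.foldl_map]
  rw [h1]
  unfold pvB_step
  rw [PySem.List.foldl_prod_mk
        (f := fun (l : PySem.Set (Int × Int)) (q : Int × Int) =>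
          if pvCell env q.1 q.2 ≠ 'X' then PySem.Set.add l q else l)
        (g := fun (t : PySem.Set (Int × Int) × Option (Int × Int) × Option (Int × Int)) (q : Int × Int) =>
          (if pvCell env q.1 q.2 = 'R' then PySem.Set.add t.1 q else t.1,
           if pvCell env q.1 q.2 = 'A' then some q else t.2.1,
           if pvCell env q.1 q.2 = 'B' then some q else t.2.2)),
      PySem.List.foldl_prod_mk
        (f := fun (l : PySem.Set (Int × Int)) (q : Int × Int) =>
          if pvCell env q.1 q.2 = 'R' then PySem.Set.add l q else l)
        (g := fun (t : Option (Int × Int) × Option (Int × Int)) (q : Int × Int) =>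
          (if pvCell env q.1 q.2 = 'A' then some q else t.1,
           if pvCell env q.1 q.2 = 'B' then some q else t.2)),
      PySem.List.foldl_prod_mk
        (f := fun (t : Option (Int × Int)) (q : Int × Int) => if pvCell env q.1 q.2 = 'A' then some q else t)
        (g := fun (t : Option (Int × Int)) (q : Int × Int) => if pvCell env q.1 q.2 = 'B' then some q else t)]
  rw [PySem.List.foldl_ite_eq_foldl_filter (fun q : Int × Int => pvCell env q.1 q.2 ≠ 'X') PySem.Set.add,
      PySem.List.foldl_ite_eq_foldl_filter (fun q : Int × Int => pvCell env q.1 q.2 = 'R') PySem.Set.add,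
      pv_foldl_last (fun q : Int × Int => pvCell env q.1 q.2 = 'A'),
      pv_foldl_last (fun q : Int × Int => pvCell env q.1 q.2 = 'B'),
      show PySem.Set.empty = ([] : PySem.Set (Int × Int)) from rfl,
      ← PySem.Set.ofList_eq_foldl, ← PySem.Set.ofList_eq_foldl]
  refine Prod.ext rfl (Prod.ext rfl (Prod.ext ?_ ?_)) <;>
    · dsimp only
      cases List.find? _ _ <;> rfl

theorem pv_mem_coordsA (env : List String) (q : Int × Int) :
    q ∈ pvCoordsA env ↔ 0 ≤ q.1 ∧ q.1 < pvCols env ∧ 0 ≤ q.2 ∧ q.2 < (env.length : Int) := by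
  rcases q with ⟨x, y⟩
  simp [pvCoordsA, PySem.List.mem_pyRange_one]
  tauto

theorem pv_mem_coordsB (env : List String) (q : Int × Int) :
    q ∈ pvPre_cells env ↔ 0 ≤ q.1 ∧ q.1 < pvCols env ∧ 0 ≤ q.2 ∧ q.2 < (env.length : Int) := by
  rcases q with ⟨x, y⟩
  simp [pvPre_cells, PySem.List.mem_pyRange_one]
  tauto

-- ---- uniqueness helpers ----

theorem pv_unique {α : Type} (l : List α) (p : α → Bool) (h : l.countP p = 1)
    (a b : α) (ha : a ∈ l) (hpa : p a = true) (hb : b ∈ l) (hpb : p b = true) : a = b := by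
  rw [List.countP_eq_length_filter] at h
  have ha' : a ∈ l.filter p := List.mem_filter.mpr ⟨ha, hpa⟩
  have hb' : b ∈ l.filter p := List.mem_filter.mpr ⟨hb, hpb⟩
  match hfl : l.filter p with
  | [] => rw [hfl] at ha'; simp at ha'
  | [c] => rw [hfl] at ha' hb'; simp at ha' hb'; rw [ha', hb']
  | c :: d :: t => rw [hfl] at h; simp at h

theorem pv_exists_of_countP_one {α : Type} (l : List α) (p : α → Bool) (h : l.countP p = 1) :
    ∃ a ∈ l, p a = true := by
  have : 0 < l.countP p := by omega
  exact List.countP_pos_iff.mp this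

-- ---- the two ports find the same (unique or absent) 'A' and 'B' cells ----

theorem pv_count_eq (env : List String) (c : Char) :
    pvPre_count env c = (pvPre_cells env).countP (fun q => decide (pvCell env q.1 q.2 = c)) := by
  unfold pvPre_count
  apply List.countP_congr
  intro a _
  by_cases h : pvCell env a.1 a.2 = c <;> simp [h]

theorem pv_find_eq (env : List String) (c : Char) (h : pvPre_count env c ≤ 1) :
    (pvCoordsA env).find? (fun q => decide (pvCell env q.1 q.2 = c))
      = (pvPre_cells env).reverse.find? (fun q => decide (pvCell env q.1 q.2 = c)) := by
  set pb := fun q : Int × Int => decide (pvCell env q.1 q.2 = c) with hpb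
  rcases Nat.lt_or_ge (pvPre_count env c) 1 with h0 | h1
  · have hz : pvPre_count env c = 0 := by omega
    have hall : ∀ x ∈ pvPre_cells env, ¬ pb x = true := by
      intro x hx hpx
      have : 0 < (pvPre_cells env).countP pb := List.countP_pos_iff.mpr ⟨x, hx, hpx⟩
      rw [← pv_count_eq] at this
      omega
    rw [List.find?_eq_none.mpr fun x hx => hall x ((pv_mem_coordsB env x).mpr ((pv_mem_coordsA env x).mp hx)),
      List.find?_eq_none.mpr fun x hx => hall x (List.mem_reverse.mp hx)]
  · have h1' : pvPre_count env c = 1 := by omega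
    have hcount : (pvPre_cells env).countP pb = 1 := by rw [← pv_count_eq]; exact h1'
    obtain ⟨a, ha, hpa⟩ := pv_exists_of_countP_one _ pb hcount
    cases hfa : (pvCoordsA env).find? pb with
    | none =>
      rw [List.find?_eq_none] at hfa
      exact absurd hpa (hfa a ((pv_mem_coordsA env a).mpr ((pv_mem_coordsB env a).mp ha)))
    | some a1 =>
      cases hfb : (pvPre_cells env).reverse.find? pb with
      | none =>
        rw [List.find?_eq_none] at hfb
        exact absurd hpa (hfb a (List.mem_reverse.mpr ha))
      | some a2 =>
        have h1m : a1 ∈ pvPre_cells env :=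
          (pv_mem_coordsB env a1).mpr ((pv_mem_coordsA env a1).mp (List.mem_of_find?_eq_some hfa))
        have h2m : a2 ∈ pvPre_cells env := List.mem_reverse.mp (List.mem_of_find?_eq_some hfb)
        rw [pv_unique _ pb hcount a1 a2 h1m (List.find?_some hfa) h2m (List.find?_some hfb)]

theorem pv_isNode_of_isA (env : List String) (c : Char) (hc : c ≠ 'X') (p : Int × Int)
    (hf : (pvPre_cells env).reverse.find? (fun q => decide (pvCell env q.1 q.2 = c)) = some p) :
    p ∈ (pvCoordsA env).filter (fun q => decide (pvCell env q.1 q.2 ≠ 'X')) := by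
  have hm : p ∈ pvCoordsA env :=
    (pv_mem_coordsA env p).mpr ((pv_mem_coordsB env p).mp (List.mem_reverse.mp (List.mem_of_find?_eq_some hf)))
  have hp : pvCell env p.1 p.2 = c := by simpa using List.find?_some hf
  exact List.mem_filter.mpr ⟨hm, by simp [hp, hc]⟩

-- ===== VERDICT (by name: the statement is the Claim_ definition above) =====
theorem rewardShortPath_spec : Claim_equal_rewardShortPath := by
  unfold Claim_equal_rewardShortPath
  intro env _ hpre
  unfold Spec_rewardShortPath
  obtain ⟨hne, hrows, hcase⟩ := hpre
  have hA1 : pvPre_count env 'A' ≤ 1 := by rcases hcase with ⟨h, _⟩ | ⟨h, _⟩ <;> omega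
  have hB1 : pvPre_count env 'B' ≤ 1 := by rcases hcase with ⟨_, h⟩ | ⟨_, h, _⟩ <;> omega
  unfold rewardShortPath rewardShortPath_alt
  rw [pv_scanA_eq, pv_scanB_eq, pv_find_eq env 'A' hA1, pv_find_eq env 'B' hB1]
  dsimp only
  rw [PySem.List.foldl_append_singleton_eq_map, List.nil_append, pv_pick_eq]
  rw [← pv_main
        ((pvCoordsA env).filter (fun q => decide (pvCell env q.1 q.2 ≠ 'X')))
        ((pvCoordsA env).filter (fun q => decide (pvCell env q.1 q.2 = 'R')))
        (PySem.Set.ofList ((pvPre_cells env).filter (fun q => decide (pvCell env q.1 q.2 ≠ 'X'))))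
        (PySem.Set.ofList ((pvPre_cells env).filter (fun q => decide (pvCell env q.1 q.2 = 'R'))))
        ((pvPre_cells env).reverse.find? (fun q => decide (pvCell env q.1 q.2 = 'B')))
        (by
          intro q
          simp only [PySem.Set.mem_ofList, List.mem_filter, pv_mem_coordsA, pv_mem_coordsB])
        (by
          intro q
          simp only [PySem.Set.mem_ofList, List.mem_filter, pv_mem_coordsA, pv_mem_coordsB])
        (env.length * (pvCols env).toNat + 1)
        ((pvPre_cells env).reverse.find? (fun q => decide (pvCell env q.1 q.2 = 'A')))
        [] PySem.Set.empty 0 0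
        (by intro m; simp [PySem.Set.empty])
        (by simp)
        rfl
        (by
          intro p hp
          exact pv_isNode_of_isA env 'A' (by decide) p hp)]
  cases pvB_dfs _ _ _ _ _ _ _ _ <;> rfl
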